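-- pv_equiv track=rewrite | github.com/Chiennv-3012/Text-to-Speech | detect_server/CRAFT/file_utils.py | PhanBlock
-- ===== SOURCE A (Python) =====
-- def PhanBlock(data):
--     Lines = []
--     LineToSort = []
--     SortedBox = []
--
--     for i, dulieu in enumerate(data):
--         top = dulieu[1]
--         bot = dulieu[3]
--
--         if i == 0 or abs(Lines[i-1] - top) > height:
--             Lines.append(top)
--         else:
--             Lines.append(Lines[i-1])
--
--         height = bot - top
--
--     for i, l in enumerate(Lines):
--         if Lines[i] == Lines[i-1] or len(LineToSort) == 0:
--             LineToSort.append(data[i])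
--         else:
--             SortedLine = sorted(LineToSort, key=lambda b:b[0], reverse=False)
--             SortedBox.extend(SortedLine)
--             LineToSort = []
--             LineToSort.append(data[i])
--
--     return SortedBox
-- ===== SOURCE B (Python) =====
-- def PhanBlock(data):
--     out = []
--     group = []
--     prev_label = None
--     height = 0
--     for box in data:
--         top, bot = box[1], box[3]
--         if prev_label is None or abs(prev_label - top) > height:
--             label = top
--         else:
--             label = prev_label
--         if prev_label is None or label == prev_label:
--             group.append(box)
--         else:
--             out.extend(sorted(group, key=lambda b: b[0]))
--             group = [box]
--         prev_label = label
--         height = bot - top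
--     return out
-- ===== Notes on version B (the rewrite author's own statement) =====
-- stated objective: alternative
-- what changed: A's two passes (build the full Lines label list, then re-scan it with index arithmetic to group and sort) are fused into one loop over the boxes that tracks only the previous label and running height, so the intermediate Lines list and all indexing disappear.
import Mathlib
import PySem

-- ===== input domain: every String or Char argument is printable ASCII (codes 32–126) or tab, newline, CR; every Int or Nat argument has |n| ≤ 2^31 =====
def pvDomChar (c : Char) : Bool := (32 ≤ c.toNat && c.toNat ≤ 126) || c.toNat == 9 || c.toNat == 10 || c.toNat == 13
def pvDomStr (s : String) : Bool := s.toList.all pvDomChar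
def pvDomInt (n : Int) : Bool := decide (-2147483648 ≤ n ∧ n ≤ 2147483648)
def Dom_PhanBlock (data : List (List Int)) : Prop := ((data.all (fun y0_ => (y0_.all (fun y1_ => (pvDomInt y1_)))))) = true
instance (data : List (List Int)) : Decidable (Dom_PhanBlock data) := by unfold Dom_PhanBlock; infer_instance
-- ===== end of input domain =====

-- B fuses A's two passes (label pass over `data`, then grouping pass over `Lines`) into one
-- loop tracking the previous label and running height, so the intermediate `Lines` list
-- disappears (objective: alternative decomposition; A's dropped final group is reproduced).

-- ===== PORT A =====
/-- body of A's first loop: state (Lines, height), element (i, dulieu) -/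
def PhanBlockStep1 (st : List Int × Int) (p : Int × List Int) : List Int × Int :=
  let i := p.1
  let dulieu := p.2
  let top := (PySem.List.pyGet? dulieu 1).getD 0
  let bot := (PySem.List.pyGet? dulieu 3).getD 0
  let Ls := st.1
  let height := st.2
  let Ls' := if i == 0 || |((PySem.List.pyGet? Ls (i - 1)).getD 0) - top| > height
    then Ls ++ [top]
    else Ls ++ [(PySem.List.pyGet? Ls (i - 1)).getD 0]
  (Ls', bot - top)

/-- body of A's second loop: closes over `Lines` and `data`; state (SortedBox, LineToSort) -/
def PhanBlockStep2 (Lines : List Int) (data : List (List Int))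
    (st : List (List Int) × List (List Int)) (p : Int × Int) : List (List Int) × List (List Int) :=
  let i := p.1
  let SortedBox := st.1
  let LineToSort := st.2
  if PySem.List.pyGet? Lines i == PySem.List.pyGet? Lines (i - 1) || LineToSort.length == 0
    then (SortedBox, LineToSort ++ [(PySem.List.pyGet? data i).getD []])
    else (SortedBox ++ PySem.List.sorted LineToSort (fun b => (PySem.List.pyGet? b 0).getD 0) false,
          [(PySem.List.pyGet? data i).getD []])

def PhanBlock (data : List (List Int)) : List (List Int) :=
  let Lines := ((PySem.List.enumerate data).foldl PhanBlockStep1 ([], 0)).1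
  ((PySem.List.enumerate Lines).foldl (PhanBlockStep2 Lines data) ([], [])).1

-- ===== PORT B =====
/-- body of B's single loop: state (out, group, prev_label, height) -/
def PhanBlockAltStep (st : List (List Int) × List (List Int) × Option Int × Int)
    (box : List Int) : List (List Int) × List (List Int) × Option Int × Int :=
  let out := st.1
  let group := st.2.1
  let prevLabel := st.2.2.1
  let height := st.2.2.2
  let top := (PySem.List.pyGet? box 1).getD 0
  let bot := (PySem.List.pyGet? box 3).getD 0
  match prevLabel with
  | none => (out, group ++ [box], some top, bot - top)
  | some pl =>
    let label := if |pl - top| > height then top else pl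
    if label == pl then (out, group ++ [box], some label, bot - top)
    else (out ++ PySem.List.sorted group (fun b => (PySem.List.pyGet? b 0).getD 0) false,
          [box], some label, bot - top)

def PhanBlock_alt (data : List (List Int)) : List (List Int) :=
  (data.foldl PhanBlockAltStep ([], [], none, 0)).1

-- ===== PRECONDITION & SPEC =====
-- Pre_ excludes exactly the inputs where Python A raises IndexError: a row shorter than 4 (dulieu[3]).
def Pre_PhanBlock (data : List (List Int)) : Prop := ∀ r ∈ data, 4 ≤ r.length
instance (data : List (List Int)) : Decidable (Pre_PhanBlock data) := by unfold Pre_PhanBlock; infer_instance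
def pvWitness_PhanBlock : List (List Int) := [[0, 1, 2, 3], [5, 1, 7, 3]]

def Spec_PhanBlock (data : List (List Int)) (out : List (List Int)) : Prop := out = PhanBlock_alt data
instance (data : List (List Int)) (out : List (List Int)) : Decidable (Spec_PhanBlock data out) := by unfold Spec_PhanBlock; infer_instance

-- ===== CLAIM (what is proved, stated in full; the proofs are below) =====
def Claim_equal_PhanBlock : Prop := ∀ (data : List (List Int)), Dom_PhanBlock data → Pre_PhanBlock data → Spec_PhanBlock data (PhanBlock data)

-- ===== LEMMAS AND PROOFS =====

-- proof-only helpers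
def pvTop (b : List Int) : Int := (PySem.List.pyGet? b 1).getD 0
def pvBot (b : List Int) : Int := (PySem.List.pyGet? b 3).getD 0
def pvSortX (g : List (List Int)) : List (List Int) :=
  PySem.List.sorted g (fun b => (PySem.List.pyGet? b 0).getD 0) false

/-- the tail of A's `Lines`: labels of the remaining boxes given the previous label and height -/
def pvLabels : List (List Int) → Int → Int → List Int
  | [], _, _ => []
  | b :: rest, pl, h =>
    let l := if |pl - pvTop b| > h then pvTop b else pl
    l :: pvLabels rest l (pvBot b - pvTop b)

/-- grouping by runs of equal consecutive labels; the final group is dropped (as in A) -/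
def pvGo : List (Int × List Int) → Int → List (List Int) → List (List Int) → List (List Int)
  | [], _, out, _ => out
  | (l, b) :: rest, pl, out, g =>
    if l = pl then pvGo rest l out (g ++ [b])
    else pvGo rest l (out ++ pvSortX g) [b]

theorem pvLabels_length (rest : List (List Int)) : ∀ pl h, (pvLabels rest pl h).length = rest.length := by
  induction rest with
  | nil => intro pl h; rfl
  | cons b t ih => intro pl h; simp [pvLabels, ih]

theorem pvB_loop (rest : List (List Int)) :
    ∀ pl h out g,
      (rest.foldl PhanBlockAltStep (out, g, some pl, h)).1
      = pvGo ((pvLabels rest pl h).zip rest) pl out g := by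
  induction rest with
  | nil => intro pl h out g; rfl
  | cons b t ih =>
    intro pl h out g
    rw [List.foldl_cons]
    by_cases hl : (if |pl - pvTop b| > h then pvTop b else pl) = pl
    · have hstep : PhanBlockAltStep (out, g, some pl, h) b
          = (out, g ++ [b], some pl, pvBot b - pvTop b) := by
        simp only [pvTop] at hl
        simp [PhanBlockAltStep, pvTop, pvBot, hl]
      rw [hstep, ih]
      simp [pvLabels, pvGo, hl]
    · have hstep : PhanBlockAltStep (out, g, some pl, h) b
          = (out ++ pvSortX g, [b], some (if |pl - pvTop b| > h then pvTop b else pl),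
             pvBot b - pvTop b) := by
        simp only [pvTop] at hl
        simp [PhanBlockAltStep, pvSortX, pvTop, pvBot, hl]
      rw [hstep, ih]
      simp [pvLabels, pvGo, hl]

theorem pvA_loop1 (rest : List (List Int)) :
    ∀ (Ls : List Int) (h pl : Int), Ls.getLast? = some pl →
      ((PySem.List.enumerate rest (Ls.length : Int)).foldl PhanBlockStep1 (Ls, h)).1
      = Ls ++ pvLabels rest pl h := by
  induction rest with
  | nil => intro Ls h pl _; simp [PySem.List.enumerate_nil, pvLabels]
  | cons b t ih =>
    intro Ls h pl hlast
    have hne : Ls ≠ [] := by intro e; simp [e] at hlast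
    have hpos : 1 ≤ Ls.length := List.length_pos_iff.mpr hne
    rw [PySem.List.enumerate_cons, List.foldl_cons]
    have hcast : ((Ls.length : Int) - 1) = ((Ls.length - 1 : Nat) : Int) := by omega
    have hget : PySem.List.pyGet? Ls ((Ls.length : Int) - 1) = some pl := by
      rw [hcast, PySem.List.pyGet?_natCast, ← List.getLast?_eq_getElem?]
      exact hlast
    have hnz : (((Ls.length : Int)) == 0) = false := by
      simp only [beq_eq_false_iff_ne, ne_eq, Nat.cast_eq_zero]; omega
    have hstep : PhanBlockStep1 (Ls, h) ((Ls.length : Int), b)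
        = (Ls ++ [if |pl - pvTop b| > h then pvTop b else pl], pvBot b - pvTop b) := by
      simp only [PhanBlockStep1, hget, hnz, Bool.false_or, pvTop, pvBot, Option.getD_some,
        decide_eq_true_eq]
      split_ifs with hc <;> rfl
    rw [hstep]
    have hlen : (Ls.length : Int) + 1 = (((Ls ++ [if |pl - pvTop b| > h then pvTop b else pl]).length : Nat) : Int) := by
      simp
    rw [hlen, ih (Ls ++ [if |pl - pvTop b| > h then pvTop b else pl]) (pvBot b - pvTop b)
      (if |pl - pvTop b| > h then pvTop b else pl) (by simp)]
    simp [pvLabels, List.append_assoc]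

theorem pvA_loop2 (L : List Int) (data : List (List Int)) (ls2 : List Int) :
    ∀ (ds2 : List (List Int)) (pre : List Int) (preD : List (List Int))
      (pl : Int) (out g : List (List Int)),
      L = pre ++ ls2 → data = preD ++ ds2 → pre.length = preD.length →
      ls2.length = ds2.length → pre.getLast? = some pl → g ≠ [] →
      ((PySem.List.enumerate ls2 (pre.length : Int)).foldl (PhanBlockStep2 L data) (out, g)).1
      = pvGo (ls2.zip ds2) pl out g := by
  induction ls2 with
  | nil =>
    intro ds2 pre preD pl out g _ _ _ _ _ _
    simp [PySem.List.enumerate_nil, pvGo]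
  | cons l lt ih =>
    intro ds2 pre preD pl out g hL hdata hlenp hlen2 hlast hg
    cases ds2 with
    | nil => simp at hlen2
    | cons d dt =>
      rw [PySem.List.enumerate_cons, List.foldl_cons]
      have hpne : pre ≠ [] := by intro e; simp [e] at hlast
      have hppos : 1 ≤ pre.length := List.length_pos_iff.mpr hpne
      have hA : PySem.List.pyGet? L ((pre.length : Int)) = some l := by
        rw [hL]; exact PySem.List.pyGet?_append_length pre lt l
      have hB : PySem.List.pyGet? L ((pre.length : Int) - 1) = some pl := by
        have hcast : ((pre.length : Int) - 1) = ((pre.length - 1 : Nat) : Int) := by omega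
        rw [hcast, PySem.List.pyGet?_natCast, hL, List.getElem?_append_left (by omega),
          ← List.getLast?_eq_getElem?]
        exact hlast
      have hD : PySem.List.pyGet? data ((pre.length : Int)) = some d := by
        rw [hdata, show ((pre.length : Int)) = ((preD.length : Nat) : Int) by omega]
        exact PySem.List.pyGet?_append_length preD dt d
      have hglen : (g.length == 0) = false := by
        simp only [beq_eq_false_iff_ne, ne_eq, List.length_eq_zero_iff]; exact hg
      by_cases hlp : l = pl
      · have hstep : PhanBlockStep2 L data (out, g) ((pre.length : Int), l)
            = (out, g ++ [d]) := by
          simp [PhanBlockStep2, hA, hB, hD, hglen, hlp]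
        rw [hstep,
          show (pre.length : Int) + 1 = (((pre ++ [l]).length : Nat) : Int) by simp,
          ih dt (pre ++ [l]) (preD ++ [d]) l out (g ++ [d])
            (by simp [hL]) (by simp [hdata]) (by simp [hlenp]) (by simpa using hlen2)
            (by simp) (by simp)]
        simp [pvGo, hlp]
      · have hstep : PhanBlockStep2 L data (out, g) ((pre.length : Int), l)
            = (out ++ pvSortX g, [d]) := by
          simp [PhanBlockStep2, hA, hB, hD, hglen, hlp, pvSortX]
        rw [hstep,
          show (pre.length : Int) + 1 = (((pre ++ [l]).length : Nat) : Int) by simp,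
          ih dt (pre ++ [l]) (preD ++ [d]) l (out ++ pvSortX g) [d]
            (by simp [hL]) (by simp [hdata]) (by simp [hlenp]) (by simpa using hlen2)
            (by simp) (by simp)]
        simp [pvGo, hlp]

-- ===== VERDICT (by name: the statement is the Claim_ definition above) =====
theorem PhanBlock_spec : Claim_equal_PhanBlock := by
  intro data _ _
  show PhanBlock data = PhanBlock_alt data
  cases data with
  | nil => rfl
  | cons b rest =>
    unfold PhanBlock PhanBlock_alt
    rw [PySem.List.enumerate_cons, List.foldl_cons, List.foldl_cons]
    have h1 : PhanBlockStep1 ([], 0) (0, b) = ([pvTop b], pvBot b - pvTop b) := by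
      simp [PhanBlockStep1, pvTop, pvBot]
    have hB1 : PhanBlockAltStep (([], [], none, 0) : List (List Int) × List (List Int) × Option Int × Int) b
        = ([], [b], some (pvTop b), pvBot b - pvTop b) := by
      simp [PhanBlockAltStep, pvTop, pvBot]
    rw [h1, hB1, show (0:Int) + 1 = (([pvTop b] : List Int).length : Int) by simp,
      pvA_loop1 rest [pvTop b] _ (pvTop b) rfl, pvB_loop]
    show ((PySem.List.enumerate (pvTop b :: pvLabels rest (pvTop b) (pvBot b - pvTop b))).foldl
        (PhanBlockStep2 (pvTop b :: pvLabels rest (pvTop b) (pvBot b - pvTop b)) (b :: rest)) ([], [])).1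
      = pvGo ((pvLabels rest (pvTop b) (pvBot b - pvTop b)).zip rest) (pvTop b) [] [b]
    rw [PySem.List.enumerate_cons, List.foldl_cons]
    have h2 : PhanBlockStep2 (pvTop b :: pvLabels rest (pvTop b) (pvBot b - pvTop b)) (b :: rest)
        (([], []) : List (List Int) × List (List Int)) (0, pvTop b) = ([], [b]) := by
      simp [PhanBlockStep2]
    rw [h2, show (0:Int) + 1 = (([pvTop b] : List Int).length : Int) by simp,
      pvA_loop2 (pvTop b :: pvLabels rest (pvTop b) (pvBot b - pvTop b)) (b :: rest)
        (pvLabels rest (pvTop b) (pvBot b - pvTop b)) rest [pvTop b] [b] (pvTop b) [] [b]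
        rfl rfl rfl (pvLabels_length rest _ _) rfl (by simp)]
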